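-- pv_equiv track=rewrite | github.com/StBinge/leetcode | 2019.the-score-of-students-solving-math-expression.py | scoreOfStudents
-- ===== SOURCE A (Python) =====
-- from typing import List
--
-- def scoreOfStudents(s: str, answers: List[int]) -> int:
--
--     st=[]
--     for ch in s:
--         if ch=='+':
--             continue
--         elif ch=='*':
--             st.append('*')
--         else:
--             if st and st[-1]=='*':
--                 st.pop()
--                 st.append(st.pop()*int(ch))
--             else:
--                 st.append(int(ch))
--     answer=sum(st)
--
--     N=len(s)
--     # digits=[]
--     # ops=[]
--     # for ch in s:
--     #     if ch.isdigit():
--     #         digits.append(int(ch))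
--     #     elif ch=='*':
--     #         ops.append('*')
--     #     else:
--     #         if ops and ops[-1]==
--
--
--     add=lambda x,y:x+y
--     mul=lambda x,y:x*y
--
--     f=[[None for _ in range(N)] for _ in range(N)]
--     for i in range(N-1,-1,-2):
--         f[i][i]=[int(s[i])]
--         for j in range(i+2,N,2):
--             vals=set()
--             for k in range(i+1,j,2):
--                 op=add if s[k]=='+' else mul
--                 for v1 in f[i][k-1]:
--                     for v2 in f[k+1][j]:
--                         v=op(v1,v2)
--                         if v>1000:
--                             continue
--                         vals.add(v)
--             f[i][j]=vals
--
--     values=f[0][-1]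
--     ret=0
--     for n in answers:
--         if n==answer:
--             ret+=5
--         elif n in values:
--             ret+=2
--     return ret
-- ===== SOURCE B (Python) =====
-- from typing import List
--
-- def scoreOfStudents(s: str, answers: List[int]) -> int:
--     # correct answer: one pass with (banked-sum, current-product, pending-*) -- no stack
--     total, cur, mul = 0, 0, False
--     for ch in s:
--         if ch == '+':
--             pass
--         elif ch == '*':
--             mul = True
--         else:
--             d = int(ch)
--             if mul:
--                 cur *= d
--                 mul = False
--             else:
--                 total += cur
--                 cur = d
--     answer = total + cur
--
--     # achievable values: memoized recursion over index intervals
--     n = len(s)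
--     memo = {}
--     def solve(i, j):
--         if (i, j) in memo:
--             return memo[(i, j)]
--         if i == j:
--             res = {int(s[i])}
--         else:
--             res = set()
--             for k in range(i + 1, j, 2):
--                 a = solve(i, k - 1)
--                 b = solve(k + 1, j)
--                 if s[k] == '+':
--                     for x in a:
--                         for y in b:
--                             v = x + y
--                             if v <= 1000:
--                                 res.add(v)
--                 else:
--                     for x in a:
--                         for y in b:
--                             v = x * y
--                             if v <= 1000:
--                                 res.add(v)
--         memo[(i, j)] = res
--         return res
--     values = solve(0, n - 1)
--
--     ret = 0
--     for a in answers: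
--         ret += 5 if a == answer else (2 if a in values else 0)
--     return ret
-- ===== Notes on version B (the rewrite author's own statement) =====
-- stated objective: alternative
-- what changed: B replaces A's stack machine for the first-pass answer by a single (banked-sum, current-product, pending-star) accumulator pass, and replaces A's bottom-up interval table (nested range loops filling f[i][j]) by a memoized recursive solve(i,j) over index intervals.
-- outside the precondition, e.g. on scoreOfStudents('12', []): A returns 0, B returns 0
import Mathlib
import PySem

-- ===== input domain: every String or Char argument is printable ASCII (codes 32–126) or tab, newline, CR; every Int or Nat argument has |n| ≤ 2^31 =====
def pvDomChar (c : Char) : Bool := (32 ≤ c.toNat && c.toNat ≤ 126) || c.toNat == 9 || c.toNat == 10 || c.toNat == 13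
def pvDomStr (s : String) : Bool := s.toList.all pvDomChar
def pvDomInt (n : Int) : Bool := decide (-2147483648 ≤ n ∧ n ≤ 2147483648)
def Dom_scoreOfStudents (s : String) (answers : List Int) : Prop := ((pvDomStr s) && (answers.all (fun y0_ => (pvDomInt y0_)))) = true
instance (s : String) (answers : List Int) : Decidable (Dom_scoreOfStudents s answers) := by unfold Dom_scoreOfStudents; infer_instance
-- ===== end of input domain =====

-- B replaces A's stack machine by a (sum, current-product) accumulator pass and A's bottom-up
-- interval table by a memoized recursive solve over intervals; alternative decomposition, same cost.

-- ===== PORT A =====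

-- int(ch) for the digit chars Pre_ admits (exact there)
def pvCv (c : Char) : Int := (c.toNat : Int) - 48

-- s[i] for the in-range indices Pre_ admits (pyGetD is Python indexing incl. negatives)
def pvGet (cs : List Char) (i : Int) : Char := PySem.List.pyGetD cs i '0'

-- an element of A's stack: either the string '*' or an int
inductive PvStk where
  | star : PvStk
  | num : Int → PvStk
deriving DecidableEq, Repr

-- one step of A's first loop (head of the list = top of the stack)
def pvStep (st : List PvStk) (ch : Char) : List PvStk :=
  if ch = '+' then st
  else if ch = '*' then .star :: st
  else match st with
    | .star :: .num x :: rest => .num (x * pvCv ch) :: rest  -- st[-1]=='*': pop, multiply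
    | _ => .num (pvCv ch) :: st

def pvVal : PvStk → Int
  | .star => 0          -- never summed on Pre_ (a leftover '*' would make Python's sum raise)
  | .num v => v

-- the two innermost 'for v1 … for v2 …' loops of A (op chosen by isAdd)
def pvCombine (isAdd : Bool) (aL bL vals : List Int) : List Int :=
  aL.foldl (fun vals v1 =>
    bL.foldl (fun vals v2 =>
      let v := if isAdd then v1 + v2 else v1 * v2
      if v > 1000 then vals else PySem.Set.add vals v) vals) vals

-- the 'for k' loop computing vals for cell (i, j)
def pvVals (cs : List Char) (f : PySem.Dict (Int × Int) (List Int)) (i j : Int) : List Int :=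
  (PySem.List.pyRange (i+1) j 2).foldl (fun vals k =>
    pvCombine (pvGet cs k = '+') (PySem.Dict.getD f (i, k-1) [])
      (PySem.Dict.getD f (k+1, j) []) vals) []

-- the body of the 'for j' loop
def pvColStep (cs : List Char) (i : Int) (f : PySem.Dict (Int × Int) (List Int)) (j : Int) :
    PySem.Dict (Int × Int) (List Int) :=
  PySem.Dict.insert f (i, j) (pvVals cs f i j)

-- the body of the 'for i' loop
def pvRowStep (cs : List Char) (f : PySem.Dict (Int × Int) (List Int)) (i : Int) :
    PySem.Dict (Int × Int) (List Int) :=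
  (PySem.List.pyRange (i+2) (cs.length : Int) 2).foldl (pvColStep cs i)
    (PySem.Dict.insert f (i, i) [pvCv (pvGet cs i)])

def scoreOfStudents (s : String) (answers : List Int) : Int :=
  let cs := s.toList
  let st := cs.foldl pvStep []
  let answer := (st.map pvVal).sum
  let N : Int := cs.length
  let f := (PySem.List.pyRange (N-1) (-1) (-2)).foldl (pvRowStep cs)
    (PySem.Dict.empty : PySem.Dict (Int × Int) (List Int))
  let values := PySem.Dict.getD f (0, N-1) []
  answers.foldl (fun ret n => if n = answer then ret + 5 else if n ∈ values then ret + 2 else ret) 0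

-- ===== PORT B =====

-- memoized recursion of Source B's solve(i, j); the fuel only guarantees termination
def pvSolve (cs : List Char) : Nat → Int → Int → PySem.Dict (Int × Int) (List Int) →
    List Int × PySem.Dict (Int × Int) (List Int)
  | 0, _, _, memo => ([], memo)
  | fuel+1, i, j, memo =>
    match PySem.Dict.get? memo (i, j) with
    | some v => (v, memo)
    | none =>
      let rm : List Int × PySem.Dict (Int × Int) (List Int) :=
        if i = j then ([pvCv (pvGet cs i)], memo)
        else (PySem.List.pyRange (i+1) j 2).foldl (fun acc k =>
            let r1 := pvSolve cs fuel i (k-1) acc.2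
            let r2 := pvSolve cs fuel (k+1) j r1.2
            (if pvGet cs k = '+' then
                r1.1.foldl (fun r x => r2.1.foldl (fun r y =>
                  if x + y ≤ 1000 then PySem.Set.add r (x + y) else r) r) acc.1
              else
                r1.1.foldl (fun r x => r2.1.foldl (fun r y =>
                  if x * y ≤ 1000 then PySem.Set.add r (x * y) else r) r) acc.1,
             r2.2)) (([] : List Int), memo)
      (rm.1, PySem.Dict.insert rm.2 (i, j) rm.1)

def scoreOfStudents_alt (s : String) (answers : List Int) : Int :=
  let cs := s.toList
  let n : Int := cs.length
  let tcm := cs.foldl (fun (st : Int × Int × Bool) ch =>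
      if ch = '+' then st
      else if ch = '*' then (st.1, st.2.1, true)
      else if st.2.2 then (st.1, st.2.1 * pvCv ch, false)
      else (st.1 + st.2.1, pvCv ch, false)) ((0 : Int), (0 : Int), false)
  let answer := tcm.1 + tcm.2.1
  let values := (pvSolve cs (cs.length + 1) 0 (n-1) PySem.Dict.empty).1
  answers.foldl (fun ret a => ret + (if a = answer then 5 else if a ∈ values then 2 else 0)) 0

-- ===== PRECONDITION & SPEC =====

-- rest of an expression-shaped string after a digit: separator, digit, repeated; A accepts a
-- digit as a separator too (it becomes its own additive term), so Pre_ admits that as well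
def pvIsExprTail : List Char → Bool
  | [] => true
  | o :: d :: rest => (o = '+' || o = '*' || o.isDigit) && d.isDigit && pvIsExprTail rest
  | _ => false

-- an expression-shaped string: digit (sep digit)* with sep ∈ {'+', '*'} ∪ digits
def pvIsExpr : List Char → Bool
  | [] => false
  | d :: rest => d.isDigit && pvIsExprTail rest

-- Pre_ excludes strings that are not odd-length digit/separator alternations: on those A
-- raises (ValueError/IndexError/TypeError) except on degenerate answer lists (empty, or all
-- equal to the first-pass sum), where the scoring loop never touches the broken state.
def Pre_scoreOfStudents (s : String) (answers : List Int) : Prop :=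
  pvIsExpr s.toList = true

instance (s : String) (answers : List Int) : Decidable (Pre_scoreOfStudents s answers) := by
  unfold Pre_scoreOfStudents; infer_instance

def pvWitness_scoreOfStudents : String × List Int := ("7+5*2", [17, 34, 9])

def Spec_scoreOfStudents (s : String) (answers : List Int) (out : Int) : Prop := out = scoreOfStudents_alt s answers
instance (s : String) (answers : List Int) (out : Int) : Decidable (Spec_scoreOfStudents s answers out) := by unfold Spec_scoreOfStudents; infer_instance

-- ===== CLAIM (what is proved, stated in full; the proofs are below) =====
def Claim_equal_scoreOfStudents : Prop := ∀ (s : String) (answers : List Int), Dom_scoreOfStudents s answers → Pre_scoreOfStudents s answers → Spec_scoreOfStudents s answers (scoreOfStudents s answers)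

-- ===== LEMMAS AND PROOFS =====

-- range(a, b, 2) / range(a, b, -2) induction forms
theorem pvRange2_nil {a b : Int} (h : b ≤ a) : PySem.List.pyRange a b 2 = [] := by
  unfold PySem.List.pyRange
  simp [show ¬ (a < b) by omega]

theorem pvRange2_cons {a b : Int} (h : a < b) :
    PySem.List.pyRange a b 2 = a :: PySem.List.pyRange (a+2) b 2 := by
  unfold PySem.List.pyRange
  norm_num
  by_cases h2 : a + 2 < b
  · rw [if_pos h, if_pos h2,
      show ((b - a + 2 - 1) / 2).toNat = ((b - (a+2) + 2 - 1) / 2).toNat + 1 from by omega,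
      List.range_succ_eq_map]
    simp [List.map_map, Function.comp_def]
    intro k _; ring
  · rw [if_pos h, if_neg h2, show ((b - a + 2 - 1) / 2).toNat = 1 from by omega]
    simp [List.range_succ]

theorem pvRangeN2_nil {a b : Int} (h : a ≤ b) : PySem.List.pyRange a b (-2) = [] := by
  unfold PySem.List.pyRange
  norm_num
  intro h2; omega

theorem pvRangeN2_cons {a b : Int} (h : b < a) :
    PySem.List.pyRange a b (-2) = a :: PySem.List.pyRange (a-2) b (-2) := by
  unfold PySem.List.pyRange
  norm_num
  by_cases h2 : b < a - 2
  · rw [if_pos h, if_pos h2,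
      show ((a - b + 2 - 1) / 2).toNat = ((a - 2 - b + 2 - 1) / 2).toNat + 1 from by omega,
      List.range_succ_eq_map]
    simp [List.map_map, Function.comp_def]
    intro k _; ring
  · rw [if_pos h, if_neg h2, show ((a - b + 2 - 1) / 2).toNat = 1 from by omega]
    simp [List.range_succ]

theorem pvDigit_ne {d : Char} (h : d.isDigit = true) : d ≠ '+' ∧ d ≠ '*' := by
  constructor <;> rintro rfl <;> simp [Char.isDigit] at h

-- the sum-of-term-products of a tail, the common meaning of A's stack run and B's accumulator run
def pvT (v : Int) : List Char → Int
  | [] => v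
  | o :: d :: rest =>
    if o = '+' then v + pvT (pvCv d) rest
    else if o = '*' then pvT (v * pvCv d) rest
    else v + pvCv o + pvT (pvCv d) rest
  | _ :: _ => v

-- A's stack run computes the sum of term products
theorem pvStack_run (l : List Char) (hl : pvIsExprTail l = true) :
    ∀ (v : Int) (st : List PvStk),
      ((List.foldl pvStep (.num v :: st) l).map pvVal).sum = pvT v l + (st.map pvVal).sum := by
  revert hl
  induction l using pvIsExprTail.induct with
  | case1 => intro _ v st; simp [pvT, pvVal]
  | case2 o d rest ih =>
    intro hl v st
    simp only [pvIsExprTail, Bool.and_eq_true, Bool.or_eq_true, decide_eq_true_eq] at hl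
    obtain ⟨⟨ho, hd⟩, hrest⟩ := hl
    have hd1 := (pvDigit_ne hd).1
    have hd2 := (pvDigit_ne hd).2
    rcases ho with ho | ho
    · rcases ho with ho | ho <;> subst ho
      · rw [List.foldl_cons, List.foldl_cons,
          show pvStep (PvStk.num v :: st) '+' = PvStk.num v :: st from by simp [pvStep],
          show pvStep (PvStk.num v :: st) d = PvStk.num (pvCv d) :: PvStk.num v :: st from by
            simp [pvStep, hd1, hd2],
          ih hrest]
        simp [pvT, pvVal]
        ring
      · rw [List.foldl_cons, List.foldl_cons,
          show pvStep (PvStk.num v :: st) '*' = PvStk.star :: PvStk.num v :: st from by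
            simp [pvStep],
          show pvStep (PvStk.star :: PvStk.num v :: st) d = PvStk.num (v * pvCv d) :: st from by
            simp [pvStep, hd1, hd2],
          ih hrest]
        simp [pvT, pvVal]
    · have ho1 := (pvDigit_ne ho).1
      have ho2 := (pvDigit_ne ho).2
      rw [List.foldl_cons, List.foldl_cons,
        show pvStep (PvStk.num v :: st) o = PvStk.num (pvCv o) :: PvStk.num v :: st from by
          simp [pvStep, ho1, ho2],
        show pvStep (PvStk.num (pvCv o) :: PvStk.num v :: st) d
            = PvStk.num (pvCv d) :: PvStk.num (pvCv o) :: PvStk.num v :: st from by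
          simp [pvStep, hd1, hd2],
        ih hrest]
      simp [pvT, pvVal, ho1, ho2]
      ring
  | case3 x h1 h2 => intro hl; simp [pvIsExprTail] at hl

-- B's accumulator run computes the same
theorem pvBAcc_run (l : List Char) (hl : pvIsExprTail l = true) :
    ∀ (total cur : Int),
      (List.foldl (fun (st : Int × Int × Bool) ch =>
        if ch = '+' then st
        else if ch = '*' then (st.1, st.2.1, true)
        else if st.2.2 then (st.1, st.2.1 * pvCv ch, false)
        else (st.1 + st.2.1, pvCv ch, false)) (total, cur, false) l).1 +
      (List.foldl (fun (st : Int × Int × Bool) ch =>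
        if ch = '+' then st
        else if ch = '*' then (st.1, st.2.1, true)
        else if st.2.2 then (st.1, st.2.1 * pvCv ch, false)
        else (st.1 + st.2.1, pvCv ch, false)) (total, cur, false) l).2.1
      = total + pvT cur l := by
  revert hl
  induction l using pvIsExprTail.induct with
  | case1 => intro _ total cur; simp [pvT]
  | case2 o d rest ih =>
    intro hl total cur
    simp only [pvIsExprTail, Bool.and_eq_true, Bool.or_eq_true, decide_eq_true_eq] at hl
    obtain ⟨⟨ho, hd⟩, hrest⟩ := hl
    have hd1 := (pvDigit_ne hd).1
    have hd2 := (pvDigit_ne hd).2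
    rw [List.foldl_cons, List.foldl_cons]
    rcases ho with ho | ho
    · rcases ho with ho | ho <;> subst ho
      · have H := ih hrest (total + cur) (pvCv d)
        simp [hd1, hd2, pvT] at H ⊢
        linarith [H]
      · have H := ih hrest total (cur * pvCv d)
        simp [hd1, hd2, pvT] at H ⊢
        linarith [H]
    · have ho1 := (pvDigit_ne ho).1
      have ho2 := (pvDigit_ne ho).2
      have H := ih hrest (total + cur + pvCv o) (pvCv d)
      simp [hd1, hd2, ho1, ho2, pvT] at H ⊢
      linarith [H]
  | case3 x h1 h2 => intro hl; simp [pvIsExprTail] at hl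

-- fuel-indexed achievable-values spec shared by both value computations
def pvVf (cs : List Char) : Nat → Int → Int → List Int
  | 0, _, _ => []
  | fuel+1, i, j =>
    if i = j then [pvCv (pvGet cs i)]
    else (PySem.List.pyRange (i+1) j 2).foldl (fun res k =>
        pvCombine (pvGet cs k = '+') (pvVf cs fuel i (k-1)) (pvVf cs fuel (k+1) j) res) []

def pvVstab (cs : List Char) (i j : Int) : List Int := pvVf cs ((j - i).toNat + 1) i j

theorem pvVf_congr (cs : List Char) :
    ∀ (n : Nat) (i j : Int) (f1 f2 : Nat), (j - i).toNat ≤ n →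
      (j - i).toNat < f1 → (j - i).toNat < f2 → pvVf cs f1 i j = pvVf cs f2 i j := by
  intro n
  induction n using Nat.strong_induction_on with
  | _ n ih =>
    intro i j f1 f2 hn h1 h2
    obtain ⟨g1, rfl⟩ : ∃ g, f1 = g + 1 := ⟨f1 - 1, by omega⟩
    obtain ⟨g2, rfl⟩ : ∃ g, f2 = g + 1 := ⟨f2 - 1, by omega⟩
    unfold pvVf
    by_cases hij : i = j
    · simp [hij]
    · rw [if_neg hij, if_neg hij]
      apply PySem.List.foldl_congr_mem
      intro res k hk
      rw [PySem.List.mem_pyRange_iff_of_pos (by norm_num)] at hk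
      obtain ⟨hk1, hk2, -⟩ := hk
      have e1 : pvVf cs g1 i (k-1) = pvVf cs g2 i (k-1) :=
        ih ((k-1) - i).toNat (by omega) i (k-1) g1 g2 le_rfl (by omega) (by omega)
      have e2 : pvVf cs g1 (k+1) j = pvVf cs g2 (k+1) j :=
        ih (j - (k+1)).toNat (by omega) (k+1) j g1 g2 le_rfl (by omega) (by omega)
      rw [e1, e2]

theorem pvVf_stab (cs : List Char) (i j : Int) (f : Nat) (hf : (j - i).toNat < f) :
    pvVf cs f i j = pvVstab cs i j :=
  pvVf_congr cs ((j - i).toNat) i j f ((j - i).toNat + 1) le_rfl hf (Nat.lt_succ_self _)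

theorem pvVstab_base (cs : List Char) (i : Int) : pvVstab cs i i = [pvCv (pvGet cs i)] := by
  simp [pvVstab, pvVf]

theorem pvVstab_empty (cs : List Char) {i j : Int} (h : j < i) : pvVstab cs i j = [] := by
  unfold pvVstab pvVf
  rw [if_neg (by omega), pvRange2_nil (by omega)]
  rfl

theorem pvVstab_unfold (cs : List Char) {i j : Int} (h : i < j) :
    pvVstab cs i j = (PySem.List.pyRange (i+1) j 2).foldl (fun res k =>
      pvCombine (pvGet cs k = '+') (pvVstab cs i (k-1)) (pvVstab cs (k+1) j) res) [] := by
  unfold pvVstab pvVf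
  rw [if_neg (by omega)]
  apply PySem.List.foldl_congr_mem
  intro res k hk
  rw [PySem.List.mem_pyRange_iff_of_pos (by norm_num)] at hk
  obtain ⟨hk1, hk2, -⟩ := hk
  rw [pvVf_stab cs i (k-1) _ (by omega), pvVf_stab cs (k+1) j _ (by omega)]
  rfl

-- Source B's branch-outside combine equals A's op-inside combine
theorem pvCombine_eq (p : Prop) [Decidable p] (aL bL res : List Int) :
    (if p then
        aL.foldl (fun r x => bL.foldl (fun r y =>
          if x + y ≤ 1000 then PySem.Set.add r (x + y) else r) r) res
      else
        aL.foldl (fun r x => bL.foldl (fun r y =>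
          if x * y ≤ 1000 then PySem.Set.add r (x * y) else r) r) res)
    = pvCombine (decide p) aL bL res := by
  unfold pvCombine
  by_cases hp : p
  · rw [if_pos hp, decide_eq_true hp]
    refine PySem.List.foldl_congr_mem _ _ _ _ ?_
    intro r x _
    refine PySem.List.foldl_congr_mem _ _ _ _ ?_
    intro r' y _
    simp only [if_true]
    split_ifs with h1 h2 <;> first | rfl | omega
  · rw [if_neg hp, decide_eq_false hp]
    refine PySem.List.foldl_congr_mem _ _ _ _ ?_
    intro r x _
    refine PySem.List.foldl_congr_mem _ _ _ _ ?_
    intro r' y _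
    simp only [Bool.false_eq_true, if_false]
    split_ifs with h1 h2 <;> first | rfl | omega

-- every entry of the memo is a stabilized value
def pvInv (cs : List Char) (memo : PySem.Dict (Int × Int) (List Int)) : Prop :=
  ∀ p v, PySem.Dict.get? memo p = some v → v = pvVstab cs p.1 p.2

theorem pvSolve_spec (cs : List Char) :
    ∀ (fuel : Nat) (i j : Int) (memo : PySem.Dict (Int × Int) (List Int)),
      (j - i).toNat < fuel → pvInv cs memo →
      (pvSolve cs fuel i j memo).1 = pvVstab cs i j ∧ pvInv cs (pvSolve cs fuel i j memo).2 := by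
  intro fuel
  induction fuel with
  | zero => intro i j memo h; exact absurd h (Nat.not_lt_zero _)
  | succ g ih =>
    intro i j memo hf hinv
    unfold pvSolve
    cases hget : PySem.Dict.get? memo (i, j) with
    | some v =>
      exact ⟨hinv (i, j) v hget, hinv⟩
    | none =>
      simp only []
      by_cases hij : i = j
      · subst hij
        rw [if_pos rfl]
        refine ⟨(pvVstab_base cs i).symm, ?_⟩
        intro p v hp
        by_cases hpi : p = (i, i)
        · subst hpi
          rw [PySem.Dict.get?_insert_self] at hp
          cases hp
          exact (pvVstab_base cs i).symm
        · rw [PySem.Dict.get?_insert_of_ne _ _ hpi] at hp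
          exact hinv p v hp
      · rw [if_neg hij]
        have haux : ∀ (ks : List Int), (∀ k ∈ ks, i + 1 ≤ k ∧ k < j) →
            ∀ (res : List Int) (m : PySem.Dict (Int × Int) (List Int)), pvInv cs m →
            (ks.foldl (fun acc k =>
              let r1 := pvSolve cs g i (k-1) acc.2
              let r2 := pvSolve cs g (k+1) j r1.2
              (if pvGet cs k = '+' then
                  r1.1.foldl (fun r x => r2.1.foldl (fun r y =>
                    if x + y ≤ 1000 then PySem.Set.add r (x + y) else r) r) acc.1
                else
                  r1.1.foldl (fun r x => r2.1.foldl (fun r y =>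
                    if x * y ≤ 1000 then PySem.Set.add r (x * y) else r) r) acc.1,
               r2.2)) (res, m)).1
              = ks.foldl (fun res k => pvCombine (pvGet cs k = '+')
                  (pvVstab cs i (k-1)) (pvVstab cs (k+1) j) res) res ∧
            pvInv cs (ks.foldl (fun acc k =>
              let r1 := pvSolve cs g i (k-1) acc.2
              let r2 := pvSolve cs g (k+1) j r1.2
              (if pvGet cs k = '+' then
                  r1.1.foldl (fun r x => r2.1.foldl (fun r y =>
                    if x + y ≤ 1000 then PySem.Set.add r (x + y) else r) r) acc.1
                else
                  r1.1.foldl (fun r x => r2.1.foldl (fun r y =>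
                    if x * y ≤ 1000 then PySem.Set.add r (x * y) else r) r) acc.1,
               r2.2)) (res, m)).2 := by
          intro ks
          induction ks with
          | nil => intro _ res m hm; exact ⟨rfl, hm⟩
          | cons k ks ihk =>
            intro hb res m hm
            have hbk := hb k List.mem_cons_self
            have hs1 := ih i (k-1) m (by omega) hm
            have hs2 := ih (k+1) j (pvSolve cs g i (k-1) m).2 (by omega) hs1.2
            have hstep : ∀ (acc : List Int × PySem.Dict (Int × Int) (List Int)),
                acc = (res, m) →
                ((if pvGet cs k = '+' then
                    (pvSolve cs g i (k-1) acc.2).1.foldl (fun r x =>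
                      (pvSolve cs g (k+1) j (pvSolve cs g i (k-1) acc.2).2).1.foldl (fun r y =>
                        if x + y ≤ 1000 then PySem.Set.add r (x + y) else r) r) acc.1
                  else
                    (pvSolve cs g i (k-1) acc.2).1.foldl (fun r x =>
                      (pvSolve cs g (k+1) j (pvSolve cs g i (k-1) acc.2).2).1.foldl (fun r y =>
                        if x * y ≤ 1000 then PySem.Set.add r (x * y) else r) r) acc.1,
                 (pvSolve cs g (k+1) j (pvSolve cs g i (k-1) acc.2).2).2))
                = (pvCombine (decide (pvGet cs k = '+')) (pvVstab cs i (k-1)) (pvVstab cs (k+1) j) res,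
                   (pvSolve cs g (k+1) j (pvSolve cs g i (k-1) m).2).2) := by
              rintro acc rfl
              simp only []
              rw [hs1.1, hs2.1, pvCombine_eq]
            simp only [List.foldl_cons]
            rw [hstep (res, m) rfl]
            exact ihk (fun k hk => hb k (List.mem_cons_of_mem _ hk)) _ _ hs2.2
        by_cases hlt : i < j
        · have hb : ∀ k ∈ PySem.List.pyRange (i+1) j 2, i + 1 ≤ k ∧ k < j := by
            intro k hk
            rw [PySem.List.mem_pyRange_iff_of_pos (by norm_num)] at hk
            exact ⟨hk.1, hk.2.1⟩
          obtain ⟨he1, he2⟩ := haux _ hb [] memo hinv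
          rw [he1, ← pvVstab_unfold cs hlt]
          refine ⟨rfl, ?_⟩
          intro p v hp
          by_cases hpi : p = (i, j)
          · subst hpi
            rw [PySem.Dict.get?_insert_self] at hp
            cases hp
            rfl
          · rw [PySem.Dict.get?_insert_of_ne _ _ hpi] at hp
            exact he2 p v hp
        · have hjlt : j < i := by omega
          rw [pvRange2_nil (by omega)]
          simp only [List.foldl_nil]
          rw [pvVstab_empty cs hjlt]
          refine ⟨rfl, ?_⟩
          intro p v hp
          by_cases hpi : p = (i, j)
          · subst hpi
            rw [PySem.Dict.get?_insert_self] at hp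
            cases hp
            exact (pvVstab_empty cs hjlt).symm
          · rw [PySem.Dict.get?_insert_of_ne _ _ hpi] at hp
            exact hinv p v hp

-- row r of A's table is fully computed in d
def pvRowDone (cs : List Char) (d : PySem.Dict (Int × Int) (List Int)) (r : Int) : Prop :=
  ∀ c, r ≤ c → c ≤ (cs.length : Int) - 1 → (2 ∣ c - r) →
    PySem.Dict.getD d (r, c) [] = pvVstab cs r c

-- processing columns j, j+2, … of row i completes row i and preserves the rows above
theorem pvInner (cs : List Char) (i : Int) (hparN : 2 ∣ ((cs.length : Int) - 1 - i)) :
    ∀ (n : Nat) (j : Int) (d : PySem.Dict (Int × Int) (List Int)),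
      ((cs.length : Int) - j).toNat ≤ n → 2 ∣ (j - i) → i < j →
      (∀ c, i ≤ c → c < j → 2 ∣ (c - i) → PySem.Dict.getD d (i, c) [] = pvVstab cs i c) →
      (∀ r, i < r → r ≤ (cs.length : Int) - 1 → 2 ∣ ((cs.length : Int) - 1 - r) →
         pvRowDone cs d r) →
      (∀ c, i ≤ c → c ≤ (cs.length : Int) - 1 → 2 ∣ (c - i) →
        PySem.Dict.getD ((PySem.List.pyRange j (cs.length : Int) 2).foldl (pvColStep cs i) d)
          (i, c) [] = pvVstab cs i c) ∧
      (∀ r, i < r → r ≤ (cs.length : Int) - 1 → 2 ∣ ((cs.length : Int) - 1 - r) →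
        pvRowDone cs ((PySem.List.pyRange j (cs.length : Int) 2).foldl (pvColStep cs i) d) r) := by
  intro n
  induction n with
  | zero =>
    intro j d hn hpar hij hrow habove
    rw [pvRange2_nil (by omega)]
    exact ⟨fun c hc1 hc2 hc3 => hrow c hc1 (by omega) hc3, habove⟩
  | succ n ihn =>
    intro j d hn hpar hij hrow habove
    by_cases hjN : (cs.length : Int) ≤ j
    · rw [pvRange2_nil hjN]
      exact ⟨fun c hc1 hc2 hc3 => hrow c hc1 (by omega) hc3, habove⟩
    · push_neg at hjN
      rw [pvRange2_cons hjN, List.foldl_cons]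
      have hvals : pvVals cs d i j = pvVstab cs i j := by
        unfold pvVals
        rw [pvVstab_unfold cs hij]
        refine PySem.List.foldl_congr_mem _ _ _ _ ?_
        intro vals k hk
        rw [PySem.List.mem_pyRange_iff_of_pos (by norm_num)] at hk
        obtain ⟨hk1, hk2, hk3⟩ := hk
        rw [hrow (k-1) (by omega) (by omega) (by omega),
          habove (k+1) (by omega) (by omega) (by omega) j (by omega) (by omega) (by omega)]
      rw [show pvColStep cs i d j = PySem.Dict.insert d (i, j) (pvVstab cs i j) from by
        rw [pvColStep, hvals]]
      apply ihn (j+2)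
      · omega
      · omega
      · omega
      · intro c hc1 hc2 hc3
        by_cases hcj : c = j
        · subst hcj
          rw [PySem.Dict.getD_insert_self]
        · rw [PySem.Dict.getD_insert_of_ne _ _ _ (by simp [Prod.ext_iff]; omega)]
          exact hrow c hc1 (by omega) hc3
      · intro r hr1 hr2 hr3 c hc1 hc2 hc3
        rw [PySem.Dict.getD_insert_of_ne _ _ _ (by simp [Prod.ext_iff]; omega)]
        exact habove r hr1 hr2 hr3 c hc1 hc2 hc3

theorem pvOuter (cs : List Char) :
    ∀ (n : Nat) (i : Int), (i + 1).toNat ≤ n → 2 ∣ ((cs.length : Int) - 1 - i) →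
      i ≤ (cs.length : Int) - 1 →
      ∀ d, (∀ r, i < r → r ≤ (cs.length : Int) - 1 → 2 ∣ ((cs.length : Int) - 1 - r) →
              pvRowDone cs d r) →
      ∀ r, 0 ≤ r → r ≤ (cs.length : Int) - 1 → 2 ∣ ((cs.length : Int) - 1 - r) →
        pvRowDone cs ((PySem.List.pyRange i (-1) (-2)).foldl (pvRowStep cs) d) r := by
  intro n
  induction n with
  | zero =>
    intro i h0 hpar hiN d habove r hr0 hrN hrpar
    rw [pvRangeN2_nil (by omega)]
    exact habove r (by omega) hrN hrpar
  | succ n ihn =>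
    intro i h0 hpar hiN d habove r hr0 hrN hrpar
    by_cases hi0 : i < 0
    · rw [pvRangeN2_nil (by omega)]
      exact habove r (by omega) hrN hrpar
    · push_neg at hi0
      rw [pvRangeN2_cons (by omega), List.foldl_cons]
      have hbase : ∀ c, i ≤ c → c < i + 2 → 2 ∣ (c - i) →
          PySem.Dict.getD (PySem.Dict.insert d (i, i) [pvCv (pvGet cs i)]) (i, c) []
            = pvVstab cs i c := by
        intro c hc1 hc2 hc3
        have hc : c = i := by omega
        subst hc
        rw [PySem.Dict.getD_insert_self, pvVstab_base]
      have habove1 : ∀ r', i < r' → r' ≤ (cs.length : Int) - 1 →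
          2 ∣ ((cs.length : Int) - 1 - r') →
          pvRowDone cs (PySem.Dict.insert d (i, i) [pvCv (pvGet cs i)]) r' := by
        intro r' h1 h2 h3 c hc1 hc2 hc3
        rw [PySem.Dict.getD_insert_of_ne _ _ _ (by simp [Prod.ext_iff]; omega)]
        exact habove r' h1 h2 h3 c hc1 hc2 hc3
      obtain ⟨hrowi, habove2⟩ := pvInner cs i hpar (((cs.length : Int) - (i + 2)).toNat) (i + 2)
        (PySem.Dict.insert d (i, i) [pvCv (pvGet cs i)]) le_rfl (by omega) (by omega)
        hbase habove1
      apply ihn (i - 2) (by omega) (by omega) (by omega) _ ?_ r hr0 hrN hrpar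
      intro r' h1 h2 h3
      by_cases hri : r' = i
      · subst hri
        intro c hc1 hc2 hc3
        exact hrowi c hc1 hc2 hc3
      · exact habove2 r' (by omega) h2 h3

-- length fact from Pre_
theorem pvTail_even (l : List Char) (h : pvIsExprTail l = true) : 2 ∣ l.length := by
  induction l using pvIsExprTail.induct <;> simp_all [pvIsExprTail]

-- ===== VERDICT (by name: the statement is the Claim_ definition above) =====
theorem scoreOfStudents_spec : Claim_equal_scoreOfStudents := by
  intro s answers _ hpre
  unfold Spec_scoreOfStudents
  rw [Pre_scoreOfStudents] at hpre
  simp only [scoreOfStudents, scoreOfStudents_alt]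
  cases hcs : s.toList with
  | nil => rw [hcs] at hpre; simp [pvIsExpr] at hpre
  | cons c0 rest =>
    rw [hcs] at hpre
    simp only [pvIsExpr, Bool.and_eq_true] at hpre
    obtain ⟨hd0, htail⟩ := hpre
    set cs := c0 :: rest with hcsdef
    -- the two correct answers agree
    have hansA : ((List.foldl pvStep [] cs).map pvVal).sum = pvT (pvCv c0) rest := by
      rw [hcsdef, List.foldl_cons,
        show pvStep [] c0 = [PvStk.num (pvCv c0)] from by
          simp [pvStep, (pvDigit_ne hd0).1, (pvDigit_ne hd0).2]]
      simpa using pvStack_run rest htail (pvCv c0) []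
    have hansB :
        (List.foldl (fun (st : Int × Int × Bool) ch =>
          if ch = '+' then st
          else if ch = '*' then (st.1, st.2.1, true)
          else if st.2.2 then (st.1, st.2.1 * pvCv ch, false)
          else (st.1 + st.2.1, pvCv ch, false)) ((0 : Int), (0 : Int), false) cs).1 +
        (List.foldl (fun (st : Int × Int × Bool) ch =>
          if ch = '+' then st
          else if ch = '*' then (st.1, st.2.1, true)
          else if st.2.2 then (st.1, st.2.1 * pvCv ch, false)
          else (st.1 + st.2.1, pvCv ch, false)) ((0 : Int), (0 : Int), false) cs).2.1
        = pvT (pvCv c0) rest := by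
      rw [hcsdef, List.foldl_cons]
      simp only [if_neg (pvDigit_ne hd0).1, if_neg (pvDigit_ne hd0).2,
        if_neg (by simp : ¬(false = true))]
      have := pvBAcc_run rest htail (0 + 0) (pvCv c0)
      simpa using this
    -- the two value sets agree
    have hrest2 : 2 ∣ rest.length := pvTail_even rest htail
    have hlen : cs.length = rest.length + 1 := rfl
    have hinvE : pvInv cs PySem.Dict.empty := by
      intro p v h
      rw [show PySem.Dict.get? (PySem.Dict.empty : PySem.Dict (Int × Int) (List Int)) p
        = none from rfl] at h
      cases h
    have hvalsB :
        (pvSolve cs (cs.length + 1) 0 ((cs.length : Int) - 1) PySem.Dict.empty).1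
          = pvVstab cs 0 ((cs.length : Int) - 1) :=
      (pvSolve_spec cs (cs.length + 1) 0 ((cs.length : Int) - 1) PySem.Dict.empty
        (by omega) hinvE).1
    have hvalsA :
        PySem.Dict.getD ((PySem.List.pyRange ((cs.length : Int) - 1) (-1) (-2)).foldl
            (pvRowStep cs) (PySem.Dict.empty : PySem.Dict (Int × Int) (List Int)))
          (0, (cs.length : Int) - 1) [] = pvVstab cs 0 ((cs.length : Int) - 1) := by
      have hrd := pvOuter cs cs.length ((cs.length : Int) - 1) (by omega) (by omega)
        (by omega) PySem.Dict.empty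
        (fun r h1 h2 _ => absurd h2 (by omega))
        0 le_rfl (by omega) (by omega)
      exact hrd ((cs.length : Int) - 1) (by omega) le_rfl (by omega)
    rw [hansA, hansB, hvalsA, hvalsB]
    refine PySem.List.foldl_congr_mem _ _ _ _ ?_
    intro acc a _
    split_ifs <;> omega
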